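-- pv_equiv track=rewrite | github.com/ioaksenenko/neural_networks | utilities/datamaker/versions/v1.0/main.py | text_input_question_generate
-- ===== SOURCE A (Python) =====
-- def text_input_question_generate(n=1, is_item=True):
--     inputs = []
--     outputs = []
--     for i in range(n):
--         input = "_"
--         output = ("[item]" if is_item else "") + "_ "
--         for j in range(i+1):
--             input += '{=_}_'
--             output += (". . " + ("[textinput]" if j == 0 else "") +
--                        "[answer]_[/answer] . " + ("_ " if j != i else ""))
--         output += "_[/textinput]" + ("[/item]" if is_item else "")
--         inputs.append(input)
--         outputs.append(output)
--     return inputs, outputs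
-- ===== SOURCE B (Python) =====
-- def text_input_question_generate(n=1, is_item=True):
--     pre = "[item]" if is_item else ""
--     post = "[/item]" if is_item else ""
--     inputs = ["_" + "{=_}_" * (i + 1) for i in range(n)]
--     outputs = []
--     for i in range(n):
--         if i == 0:
--             body = ". . [textinput][answer]_[/answer] . "
--         else:
--             body = (". . [textinput][answer]_[/answer] . _ "
--                     + ". . [answer]_[/answer] . _ " * (i - 1)
--                     + ". . [answer]_[/answer] . ")
--         outputs.append(pre + "_ " + body + "_[/textinput]" + post)
--     return inputs, outputs
-- ===== Notes on version B (the rewrite author's own statement) =====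
-- stated objective: simpler
-- what changed: Replaces the nested per-term inner loop by closed-form string repetition: each input row is '_' plus '{=_}_' repeated i+1 times, and each output row is assembled from a first/middle/last fragment with the middle repeated i-1 times.
import Mathlib
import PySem

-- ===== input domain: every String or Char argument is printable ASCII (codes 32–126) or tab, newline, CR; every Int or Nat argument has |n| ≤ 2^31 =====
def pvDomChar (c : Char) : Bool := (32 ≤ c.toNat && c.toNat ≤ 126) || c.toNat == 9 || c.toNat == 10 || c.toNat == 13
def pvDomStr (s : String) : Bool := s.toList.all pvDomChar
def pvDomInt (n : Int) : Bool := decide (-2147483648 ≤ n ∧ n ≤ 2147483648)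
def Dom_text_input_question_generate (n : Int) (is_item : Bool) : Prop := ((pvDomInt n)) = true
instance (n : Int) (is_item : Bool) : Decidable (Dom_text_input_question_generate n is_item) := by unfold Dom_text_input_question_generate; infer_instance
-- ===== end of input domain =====

-- B replaces the quadratic inner per-term loop by closed-form string repetition of the
-- row fragments (objective: simpler).

-- ===== PORT A =====
def text_input_question_generate (n : Int) (is_item : Bool) : List String × List String :=
  (PySem.List.pyRange 0 n 1).foldl
    (fun st i =>
      let p := (PySem.List.pyRange 0 (i + 1) 1).foldl
        (fun (p : String × String) j =>
          (p.1 ++ "{=_}_",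
           p.2 ++ (". . " ++ (if j == 0 then "[textinput]" else "") ++
                   "[answer]_[/answer] . " ++ (if j != i then "_ " else ""))))
        ("_", (if is_item then "[item]" else "") ++ "_ ")
      (st.1 ++ [p.1], st.2 ++ [p.2 ++ "_[/textinput]" ++ (if is_item then "[/item]" else "")]))
    ([], [])

-- ===== PORT B =====
-- hand port of Python's string repetition  s * k  (exact for k ≥ 0, which is all B uses)
def pvStrRep (s : String) : Nat → String
  | 0 => ""
  | k + 1 => s ++ pvStrRep s k

def pvRowBody (i : Int) : String :=
  if i == 0 then ". . [textinput][answer]_[/answer] . "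
  else ". . [textinput][answer]_[/answer] . _ " ++
       pvStrRep ". . [answer]_[/answer] . _ " (i - 1).toNat ++
       ". . [answer]_[/answer] . "

def text_input_question_generate_alt (n : Int) (is_item : Bool) : List String × List String :=
  let pre := if is_item then "[item]" else ""
  let post := if is_item then "[/item]" else ""
  ((PySem.List.pyRange 0 n 1).map (fun i => "_" ++ pvStrRep "{=_}_" (i + 1).toNat),
   (PySem.List.pyRange 0 n 1).map (fun i => pre ++ "_ " ++ pvRowBody i ++ "_[/textinput]" ++ post))

-- ===== PRECONDITION & SPEC =====
def Spec_text_input_question_generate (n : Int) (is_item : Bool) (out : List String × List String) : Prop := out = text_input_question_generate_alt n is_item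
instance (n : Int) (is_item : Bool) (out : List String × List String) : Decidable (Spec_text_input_question_generate n is_item out) := by unfold Spec_text_input_question_generate; infer_instance

-- ===== CLAIM (what is proved, stated in full; the proofs are below) =====
def Claim_equal_text_input_question_generate : Prop := ∀ (n : Int) (is_item : Bool), Dom_text_input_question_generate n is_item → Spec_text_input_question_generate n is_item (text_input_question_generate n is_item)

-- ===== LEMMAS AND PROOFS =====

-- A's inner loop body, as a named step function (definitionally equal to the lambda in the port)
def pvStepA (i : Int) (p : String × String) (j : Int) : String × String :=
  (p.1 ++ "{=_}_",
   p.2 ++ (". . " ++ (if j == 0 then "[textinput]" else "") ++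
           "[answer]_[/answer] . " ++ (if j != i then "_ " else "")))

def pvInnerA (i : Int) (t : String) : String × String :=
  (PySem.List.pyRange 0 (i + 1) 1).foldl (pvStepA i) ("_", t)

theorem pvStrRep_comm (s : String) (k : Nat) :
    s ++ pvStrRep s k = pvStrRep s k ++ s := by
  induction k with
  | zero => simp [pvStrRep]
  | succ k ih =>
    simp only [pvStrRep, String.append_assoc]
    rw [← ih]

-- middle portion of the inner loop: every j is neither 0 nor i
theorem pvMidFold (i : Int) (l : List Int) (h : ∀ j ∈ l, j ≠ 0 ∧ j ≠ i) :
    ∀ (s t : String), l.foldl (pvStepA i) (s, t) =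
      (s ++ pvStrRep "{=_}_" l.length,
       t ++ pvStrRep ". . [answer]_[/answer] . _ " l.length) := by
  induction l with
  | nil => intro s t; simp [pvStrRep]
  | cons x xs ih =>
    intro s t
    obtain ⟨hx0, hxi⟩ := h x (List.mem_cons_self)
    have hstep : pvStepA i (s, t) x =
        (s ++ "{=_}_", t ++ ". . [answer]_[/answer] . _ ") := by
      simp [pvStepA, hx0, hxi]
    rw [List.foldl_cons, hstep, ih (fun j hj => h j (List.mem_cons_of_mem _ hj))]
    simp [List.length_cons, pvStrRep, String.append_assoc]

theorem pvInnerA_eq (i : Int) (hi : 0 ≤ i) (t : String) :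
    pvInnerA i t = ("_" ++ pvStrRep "{=_}_" (i + 1).toNat, t ++ pvRowBody i) := by
  rcases eq_or_lt_of_le hi with h0 | hpos
  · subst h0
    rw [pvInnerA, show (0 : Int) + 1 = 0 + 1 from rfl, PySem.List.pyRange_one_singleton,
        List.foldl_cons, List.foldl_nil]
    simp [pvStepA, pvRowBody, pvStrRep]
  · -- i ≥ 1 : range 0 (i+1) = 0 :: (range 1 i ++ [i])
    have h1 : PySem.List.pyRange 0 (i + 1) 1 = 0 :: PySem.List.pyRange 1 (i + 1) 1 :=
      PySem.List.pyRange_one_cons (by omega)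
    have h2 : PySem.List.pyRange 1 (i + 1) 1 = PySem.List.pyRange 1 i 1 ++ [i] :=
      PySem.List.pyRange_one_succ_right (by omega)
    have hi0 : (0 : Int) ≠ i := by omega
    have hstep0 : pvStepA i ("_", t) 0 =
        ("_" ++ "{=_}_", t ++ ". . [textinput][answer]_[/answer] . _ ") := by
      simp [pvStepA, hi0]
    have hmid := pvMidFold i (PySem.List.pyRange 1 i 1)
      (fun j hj => by
        have := (PySem.List.mem_pyRange_one).1 hj
        constructor <;> omega)
      ("_" ++ "{=_}_") (t ++ ". . [textinput][answer]_[/answer] . _ ")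
    have hlen : (PySem.List.pyRange 1 i 1).length = (i - 1).toNat :=
      PySem.List.length_pyRange_one 1 i
    have hstepi : ∀ s u : String, pvStepA i (s, u) i =
        (s ++ "{=_}_", u ++ ". . [answer]_[/answer] . ") := by
      intro s u
      have : i ≠ 0 := by omega
      simp [pvStepA, this]
    have hbody : pvRowBody i =
        ". . [textinput][answer]_[/answer] . _ " ++
        pvStrRep ". . [answer]_[/answer] . _ " (i - 1).toNat ++
        ". . [answer]_[/answer] . " := by
      have : ¬ (i == 0) = true := by simp; omega
      simp [pvRowBody, this]
    have hcnt : (i + 1).toNat = (i - 1).toNat + 1 + 1 := by omega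
    have hrep : pvStrRep "{=_}_" ((i - 1).toNat + 1 + 1) =
        "{=_}_" ++ (pvStrRep "{=_}_" ((i - 1).toNat) ++ "{=_}_") := by
      simp only [pvStrRep]
      rw [pvStrRep_comm]
    rw [pvInnerA, h1, h2, List.foldl_cons, hstep0, List.foldl_append, hmid, hlen,
        List.foldl_cons, List.foldl_nil, hstepi, hbody, hcnt, hrep]
    simp only [String.append_assoc]

-- outer loop: the pair-of-append-singleton fold is a pair of maps
theorem pvOuterFold (f g : Int → String) (l : List Int) :
    ∀ (s t : List String),
      l.foldl (fun (st : List String × List String) i => (st.1 ++ [f i], st.2 ++ [g i])) (s, t) =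
        (s ++ l.map f, t ++ l.map g) := by
  induction l with
  | nil => intro s t; simp
  | cons x xs ih => intro s t; simp [List.foldl_cons, ih]

-- ===== VERDICT (by name: the statement is the Claim_ definition above) =====
theorem text_input_question_generate_spec : Claim_equal_text_input_question_generate := by
  intro n is_item _
  unfold Spec_text_input_question_generate
  have hA : text_input_question_generate n is_item =
      (PySem.List.pyRange 0 n 1).foldl
        (fun (st : List String × List String) i =>
          (st.1 ++ [(pvInnerA i ((if is_item then "[item]" else "") ++ "_ ")).1],
           st.2 ++ [(pvInnerA i ((if is_item then "[item]" else "") ++ "_ ")).2 ++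
                    "_[/textinput]" ++ (if is_item then "[/item]" else "")])) ([], []) := rfl
  rw [hA, pvOuterFold]
  unfold text_input_question_generate_alt
  simp only [List.nil_append]
  refine congrArg₂ Prod.mk ?_ ?_
  · apply List.map_congr_left
    intro i hi
    have h0 : 0 ≤ i := ((PySem.List.mem_pyRange_one).1 hi).1
    rw [pvInnerA_eq i h0]
  · apply List.map_congr_left
    intro i hi
    have h0 : 0 ≤ i := ((PySem.List.mem_pyRange_one).1 hi).1
    rw [pvInnerA_eq i h0]
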